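-- pv_equiv track=rewrite | github.com/YanaParfenova/L.R.1-Algorithmic-processing-of-matrices | Алгоритмическая_обработка_матриц.py | matrix_expression
-- ===== SOURCE A (Python) =====
-- def matrix_expression(A, F, K):
--     N = len(A)
--     # Умножение K * A
--     KA = [[K * A[i][j] for j in range(N)] for i in range(N)]
--
--     # Умножение KA * F
--     KAF = [[sum(KA[i][k] * F[k][j] for k in range(N)) for j in range(N)] for i in range(N)]
--
--     # Транспонирование F
--     FT = [[F[j][i] for j in range(N)] for i in range(N)]
--
--     # Умножение K * F^T
--     KF_T = [[K * FT[i][j] for j in range(N)] for i in range(N)]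
--
--     # Сложение KAF и KF_T
--     result = [[KAF[i][j] + KF_T[i][j] for j in range(N)] for i in range(N)]
--
--     return result
-- ===== SOURCE B (Python) =====
-- def matrix_expression(A, F, K):
--     # ikj-order "axpy" accumulation: each output row starts as the transpose
--     # term K*F[.][i] and is updated by adding the scaled row (K*A[i][k]) * F[k]
--     # for each k; no dot products and no intermediate matrices are formed.
--     N = len(A)
--     result = []
--     for i in range(N):
--         row = [K * F[j][i] for j in range(N)]
--         for k in range(N):
--             a = K * A[i][k]
--             Fk = F[k]
--             row = [row[j] + a * Fk[j] for j in range(N)]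
--         result.append(row)
--     return result
-- ===== Notes on version B (the rewrite author's own statement) =====
-- stated objective: alternative
-- what changed: B replaces A's staged matrices and per-cell dot products (ijk order) by ikj-order row accumulation: each output row is initialised with the transpose term K*F[j][i] and then updated by successive scaled-row additions row += (K*A[i][k])*F[k], so no dot product and no intermediate matrix is ever formed.
import Mathlib
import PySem

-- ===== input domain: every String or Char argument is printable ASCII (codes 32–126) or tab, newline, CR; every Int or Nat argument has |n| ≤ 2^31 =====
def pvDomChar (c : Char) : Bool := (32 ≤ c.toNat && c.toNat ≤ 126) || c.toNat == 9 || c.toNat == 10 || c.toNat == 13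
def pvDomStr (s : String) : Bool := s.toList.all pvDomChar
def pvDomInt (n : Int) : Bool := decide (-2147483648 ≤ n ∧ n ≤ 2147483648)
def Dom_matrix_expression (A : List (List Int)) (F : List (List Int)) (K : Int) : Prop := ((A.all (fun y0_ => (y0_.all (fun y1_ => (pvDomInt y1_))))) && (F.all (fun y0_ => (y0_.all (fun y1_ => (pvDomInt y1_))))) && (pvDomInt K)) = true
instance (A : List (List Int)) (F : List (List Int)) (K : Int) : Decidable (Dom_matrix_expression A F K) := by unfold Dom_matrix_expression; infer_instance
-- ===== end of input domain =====

-- B replaces A's staged matrices and per-cell dot products by ikj-order row accumulation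
-- (row initialised with the transpose term, then row += (K*A[i][k])*F[k]); objective: alternative.

-- ===== PORT A =====
-- literal transliteration of A: builds KA, KAF, FT, KF_T, then their sum
def matrix_expression (A : List (List Int)) (F : List (List Int)) (K : Int) : List (List Int) :=
  let N : Int := A.length
  let KA := (PySem.List.pyRange 0 N 1).map (fun i => (PySem.List.pyRange 0 N 1).map (fun j =>
    K * PySem.List.pyGetD (PySem.List.pyGetD A i []) j 0))
  let KAF := (PySem.List.pyRange 0 N 1).map (fun i => (PySem.List.pyRange 0 N 1).map (fun j =>
    ((PySem.List.pyRange 0 N 1).map (fun k =>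
      PySem.List.pyGetD (PySem.List.pyGetD KA i []) k 0 * PySem.List.pyGetD (PySem.List.pyGetD F k []) j 0)).sum))
  let FT := (PySem.List.pyRange 0 N 1).map (fun i => (PySem.List.pyRange 0 N 1).map (fun j =>
    PySem.List.pyGetD (PySem.List.pyGetD F j []) i 0))
  let KF_T := (PySem.List.pyRange 0 N 1).map (fun i => (PySem.List.pyRange 0 N 1).map (fun j =>
    K * PySem.List.pyGetD (PySem.List.pyGetD FT i []) j 0))
  let result := (PySem.List.pyRange 0 N 1).map (fun i => (PySem.List.pyRange 0 N 1).map (fun j =>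
    PySem.List.pyGetD (PySem.List.pyGetD KAF i []) j 0 + PySem.List.pyGetD (PySem.List.pyGetD KF_T i []) j 0))
  result

-- ===== PORT B =====
-- literal transliteration of B: per-row accumulator, init = transpose term,
-- then a fold over k adding the scaled row (K*A[i][k]) * F[k]
def matrix_expression_alt (A : List (List Int)) (F : List (List Int)) (K : Int) : List (List Int) :=
  let N : Int := A.length
  (PySem.List.pyRange 0 N 1).map (fun i =>
    (PySem.List.pyRange 0 N 1).foldl (fun row k =>
      let a := K * PySem.List.pyGetD (PySem.List.pyGetD A i []) k 0
      let Fk := PySem.List.pyGetD F k []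
      (PySem.List.pyRange 0 N 1).map (fun j =>
        PySem.List.pyGetD row j 0 + a * PySem.List.pyGetD Fk j 0))
    ((PySem.List.pyRange 0 N 1).map (fun j =>
      K * PySem.List.pyGetD (PySem.List.pyGetD F j []) i 0)))

-- ===== PRECONDITION & SPEC =====
-- Pre_ excludes exactly the ragged/too-small inputs on which Python A raises IndexError
-- (a row of A shorter than len(A), or F with fewer than len(A) rows/columns).
def Pre_matrix_expression (A : List (List Int)) (F : List (List Int)) (K : Int) : Prop :=
  (∀ row ∈ A, A.length ≤ row.length) ∧ A.length ≤ F.length ∧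
  ∀ row ∈ F.take A.length, A.length ≤ row.length
instance (A : List (List Int)) (F : List (List Int)) (K : Int) : Decidable (Pre_matrix_expression A F K) := by unfold Pre_matrix_expression; infer_instance
def pvWitness_matrix_expression : List (List Int) × List (List Int) × Int := ([[1, 2], [3, 4]], [[5, 6], [7, 8]], 3)
def Spec_matrix_expression (A : List (List Int)) (F : List (List Int)) (K : Int) (out : List (List Int)) : Prop := out = matrix_expression_alt A F K
instance (A : List (List Int)) (F : List (List Int)) (K : Int) (out : List (List Int)) : Decidable (Spec_matrix_expression A F K out) := by unfold Spec_matrix_expression; infer_instance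

-- ===== CLAIM =====
def Claim_equal_matrix_expression : Prop := ∀ (A : List (List Int)) (F : List (List Int)) (K : Int), Dom_matrix_expression A F K → Pre_matrix_expression A F K → Spec_matrix_expression A F K (matrix_expression A F K)

-- ===== LEMMAS AND PROOFS =====

-- folding the per-k row updates over a row that is a map over range(N)
-- yields the map whose j-th entry is the initial entry plus the sum of contributions
theorem rowfold_eq (N : Int) (t : Int → Int → Int) (ks : List Int) (g : Int → Int) :
    ks.foldl (fun row k =>
        (PySem.List.pyRange 0 N 1).map (fun j => PySem.List.pyGetD row j 0 + t k j))
      ((PySem.List.pyRange 0 N 1).map g)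
    = (PySem.List.pyRange 0 N 1).map (fun j => g j + (ks.map (fun k => t k j)).sum) := by
  induction ks generalizing g with
  | nil => simp
  | cons k ks ih =>
    simp only [List.foldl_cons]
    rw [show (PySem.List.pyRange 0 N 1).map
          (fun j => PySem.List.pyGetD ((PySem.List.pyRange 0 N 1).map g) j 0 + t k j)
        = (PySem.List.pyRange 0 N 1).map (fun j => g j + t k j) from by
      apply List.map_congr_left
      intro j hj
      obtain ⟨hj0, hjN⟩ := (PySem.List.mem_pyRange_one).mp hj
      rw [PySem.List.pyGetD_map_pyRange_of_nonneg _ _ _ _ hj0 hjN]]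
    rw [ih]
    apply List.map_congr_left
    intro j _
    simp only [List.map_cons, List.sum_cons]
    ring

theorem matrix_expression_eq_alt (A : List (List Int)) (F : List (List Int)) (K : Int) :
    matrix_expression A F K = matrix_expression_alt A F K := by
  unfold matrix_expression matrix_expression_alt
  apply List.map_congr_left
  intro i hi
  obtain ⟨hi0, hiN⟩ := (PySem.List.mem_pyRange_one).mp hi
  rw [show (fun (row : List Int) k =>
      let a := K * PySem.List.pyGetD (PySem.List.pyGetD A i []) k 0
      let Fk := PySem.List.pyGetD F k []
      (PySem.List.pyRange 0 (A.length : Int) 1).map (fun j =>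
        PySem.List.pyGetD row j 0 + a * PySem.List.pyGetD Fk j 0))
    = (fun (row : List Int) k =>
      (PySem.List.pyRange 0 (A.length : Int) 1).map (fun j =>
        PySem.List.pyGetD row j 0 +
          (K * PySem.List.pyGetD (PySem.List.pyGetD A i []) k 0) *
            PySem.List.pyGetD (PySem.List.pyGetD F k []) j 0)) from rfl]
  rw [rowfold_eq]
  apply List.map_congr_left
  intro j hj
  obtain ⟨hj0, hjN⟩ := (PySem.List.mem_pyRange_one).mp hj
  repeat (first
    | rw [PySem.List.pyGetD_map_pyRange_of_nonneg _ _ _ _ hi0 hiN]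
    | rw [PySem.List.pyGetD_map_pyRange_of_nonneg _ _ _ _ hj0 hjN])
  rw [add_comm]
  congr 1
  apply congrArg
  apply List.map_congr_left
  intro k hk
  obtain ⟨hk0, hkN⟩ := (PySem.List.mem_pyRange_one).mp hk
  repeat (first
    | rw [PySem.List.pyGetD_map_pyRange_of_nonneg _ _ _ _ hi0 hiN]
    | rw [PySem.List.pyGetD_map_pyRange_of_nonneg _ _ _ _ hk0 hkN])

-- ===== VERDICT =====
theorem matrix_expression_spec : Claim_equal_matrix_expression := by
  intro A F K _ _
  exact matrix_expression_eq_alt A F K
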